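-- pv_equiv track=rewrite | github.com/ZoeGerber/ProjetPythonL2 | Projet-3_Python.py | init3
-- ===== SOURCE A (Python) =====
-- def init3(arn):
--     i=0
--     seqARNtrad3=""
--     for i in range(2,len(arn),3):
--         codon=arn[i:i+3]
--         if (codon=="AUG"):
--             seqARNtrad3= arn[i:]
--             break
--     return (seqARNtrad3)
-- ===== SOURCE B (Python) =====
-- def init3(arn):
--     start = 0
--     while True:
--         idx = arn.find("AUG", start)
--         if idx == -1:
--             return ""
--         if idx % 3 == 2:
--             return arn[idx:]
--         start = idx + 1
-- ===== Notes on version B (the rewrite author's own statement) =====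
-- stated objective: faster
-- what changed: B jumps between successive occurrences of the start codon located by str.find (a C-level scan) and tests each match position for frame-3 alignment (idx % 3 == 2), instead of slicing out and comparing the codon at every position 2,5,8,....
import Mathlib
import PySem

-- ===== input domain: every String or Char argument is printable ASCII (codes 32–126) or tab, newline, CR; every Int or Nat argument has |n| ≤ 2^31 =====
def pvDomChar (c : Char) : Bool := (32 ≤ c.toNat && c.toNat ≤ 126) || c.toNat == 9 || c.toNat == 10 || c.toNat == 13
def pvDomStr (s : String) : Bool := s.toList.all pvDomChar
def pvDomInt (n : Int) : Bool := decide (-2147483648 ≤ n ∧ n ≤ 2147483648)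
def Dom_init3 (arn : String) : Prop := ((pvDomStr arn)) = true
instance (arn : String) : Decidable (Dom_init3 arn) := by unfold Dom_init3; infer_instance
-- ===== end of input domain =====

-- B jumps between successive start-codon occurrences located by str.find (a C-level scan,
-- measurably faster) and keeps the first frame-3 one, instead of A's slicing out and
-- comparing the codon at every position 2, 5, 8, ….

-- ===== PORT A =====
-- for i in range(2, len(arn), 3): codon = arn[i:i+3]; if codon == "AUG": return arn[i:] (via break); else ""
def init3Codons (s : List Char) : List Int → String
  | [] => ""
  | i :: rest =>
    let codon := PySem.List.slice s (some i) (some (i + 3))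
    if codon = ['A', 'U', 'G'] then String.mk (PySem.List.slice s (some i))
    else init3Codons s rest

def init3 (arn : String) : String :=
  init3Codons arn.toList (PySem.List.pyRange 2 (PySem.Str.len arn) 3)

-- ===== PORT B =====
-- needed by the port's decreasing_by: find(sub, start) with start past the end returns -1
theorem findFrom_past_len (s sub : List Char) (k : Int) (h : (s.length : Int) < k) :
    PySem.Chars.findFrom s sub k none = -1 := by
  have hn : (0 : Int) ≤ (s.length : Int) := Int.natCast_nonneg _
  simp only [PySem.Chars.findFrom]
  split_ifs <;> omega

-- while True: idx = arn.find("AUG", start); if idx == -1: return ""; if idx % 3 == 2: return arn[idx:]; start = idx + 1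
def init3FindLoop (s : List Char) (start : Nat) : String :=
  let idx := PySem.Chars.findFrom s ['A', 'U', 'G'] (start : Int) none
  if h : idx = -1 then ""
  else if PySem.Int.mod idx 3 = 2 then String.mk (PySem.List.slice s (some idx))
  else init3FindLoop s (idx.toNat + 1)
termination_by s.length + 1 - start
decreasing_by
  have hlen : start ≤ s.length := by
    by_contra hgt
    exact h (findFrom_past_len s _ _ (by exact_mod_cast Int.ofNat_lt.mpr (Nat.lt_of_not_le hgt)))
  have hspec := PySem.Chars.findFrom_natCast_spec s ['A', 'U', 'G'] start hlen h
  have h1 := hspec.1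
  omega

def init3_alt (arn : String) : String := init3FindLoop arn.toList 0

-- ===== PRECONDITION & SPEC =====
def Spec_init3 (arn : String) (out : String) : Prop := out = init3_alt arn
instance (arn : String) (out : String) : Decidable (Spec_init3 arn out) := by unfold Spec_init3; infer_instance

-- ===== CLAIM (what is proved, stated in full; the proofs are below) =====
def Claim_equal_init3 : Prop := ∀ (arn : String), Dom_init3 arn → Spec_init3 arn (init3 arn)

-- ===== LEMMAS AND PROOFS =====

-- an in-frame-3 AUG at position i
def AugAt (s : List Char) (i : Nat) : Prop := i % 3 = 2 ∧ ['A', 'U', 'G'] <+: s.drop i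

theorem augAt_lt_length {s : List Char} {i : Nat} (h : AugAt s i) : i + 3 ≤ s.length := by
  have := h.2.length_le
  simp only [List.length_drop, List.length_cons, List.length_nil] at this
  omega

-- the codon test of A at a nonnegative index a detects exactly a prefix of drop a
theorem codon_eq_iff (s : List Char) (a : Nat) :
    PySem.List.slice s (some ((a : Int))) (some ((a : Int) + 3)) = ['A', 'U', 'G'] ↔
      ['A', 'U', 'G'] <+: s.drop a := by
  have h3 : ((a : Int) + 3) = ((a + 3 : Nat) : Int) := by push_cast; ring
  rw [h3, PySem.List.slice_natCast]
  have : a + 3 - a = 3 := by omega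
  rw [this, List.prefix_iff_eq_take]
  constructor
  · intro h; simpa using h.symm
  · intro h; simpa using h.symm

theorem codons_none (s : List Char) (hnone : ∀ i, ¬ AugAt s i) :
    ∀ (m k : Nat), init3Codons s (List.map (fun j : Nat => 2 + 3 * (j : Int)) (List.range' k m)) = "" := by
  intro m
  induction m with
  | zero => intro k; simp [init3Codons]
  | succ m ih =>
    intro k
    rw [List.range'_succ, List.map_cons]
    simp only [init3Codons]
    have hc : ¬ PySem.List.slice s (some (2 + 3 * (k : Int))) (some (2 + 3 * (k : Int) + 3)) = ['A', 'U', 'G'] := by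
      have hcast : (2 + 3 * (k : Int)) = ((2 + 3 * k : Nat) : Int) := by push_cast; ring
      rw [hcast, codon_eq_iff]
      intro hpre
      exact hnone (2 + 3 * k) ⟨by omega, hpre⟩
    rw [if_neg hc]
    exact ih (k + 1)

theorem codons_some (s : List Char) (i₀ : Nat) (hA : AugAt s i₀)
    (hmin : ∀ j < i₀, ¬ AugAt s j) :
    ∀ (m k : Nat), 2 + 3 * k ≤ i₀ → i₀ < 2 + 3 * (k + m) →
      init3Codons s (List.map (fun j : Nat => 2 + 3 * (j : Int)) (List.range' k m)) =
        String.mk (s.drop i₀) := by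
  intro m
  induction m with
  | zero => intro k hk hm; omega
  | succ m ih =>
    intro k hk hm
    rw [List.range'_succ, List.map_cons]
    simp only [init3Codons]
    have hcast : (2 + 3 * (k : Int)) = ((2 + 3 * k : Nat) : Int) := by push_cast; ring
    by_cases he : 2 + 3 * k = i₀
    · have hc : PySem.List.slice s (some (2 + 3 * (k : Int))) (some (2 + 3 * (k : Int) + 3)) = ['A', 'U', 'G'] := by
        rw [hcast, codon_eq_iff, he]; exact hA.2
      rw [if_pos hc, hcast, PySem.List.slice_from s (by positivity)]
      simp [he]
    · have hc : ¬ PySem.List.slice s (some (2 + 3 * (k : Int))) (some (2 + 3 * (k : Int) + 3)) = ['A', 'U', 'G'] := by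
        rw [hcast, codon_eq_iff]
        intro hpre
        exact hmin (2 + 3 * k) (by omega) ⟨by omega, hpre⟩
      rw [if_neg hc]
      have hi2 : i₀ % 3 = 2 := hA.1
      exact ih (k + 1) (by omega) (by omega)

-- find-based loop, no in-frame AUG anywhere: returns ""
theorem loopB_none (s : List Char) (hnone : ∀ i, ¬ AugAt s i) :
    ∀ (fuel start : Nat), s.length + 1 - start ≤ fuel → init3FindLoop s start = "" := by
  intro fuel
  induction fuel with
  | zero =>
    intro start hf
    rw [init3FindLoop]
    have : PySem.Chars.findFrom s ['A', 'U', 'G'] (start : Int) none = -1 :=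
      findFrom_past_len s _ _ (by omega)
    simp [this]
  | succ fuel ih =>
    intro start hf
    rw [init3FindLoop]
    by_cases h : PySem.Chars.findFrom s ['A', 'U', 'G'] (start : Int) none = -1
    · simp [h]
    · have hlen : start ≤ s.length := by
        by_contra hgt
        exact h (findFrom_past_len s _ _ (by omega))
      have hspec := PySem.Chars.findFrom_natCast_spec s ['A', 'U', 'G'] start hlen h
      set idx := PySem.Chars.findFrom s ['A', 'U', 'G'] (start : Int) none with hidx
      have hge : (0 : Int) ≤ idx := le_trans (Int.natCast_nonneg _) hspec.1
      have hmod : ¬ PySem.Int.mod idx 3 = 2 := by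
        intro hm
        rw [PySem.Int.mod_eq_emod_of_pos (by norm_num : (0:Int) < 3)] at hm
        have : idx.toNat % 3 = 2 := by omega
        exact hnone idx.toNat ⟨this, hspec.2.1⟩
      rw [dif_neg h, if_neg hmod]
      exact ih (idx.toNat + 1) (by omega)

-- find-based loop, i₀ the least in-frame AUG, start ≤ i₀: returns the suffix from i₀
theorem loopB_some (s : List Char) (i₀ : Nat) (hA : AugAt s i₀)
    (hmin : ∀ j < i₀, ¬ AugAt s j) :
    ∀ (fuel start : Nat), i₀ + 1 - start ≤ fuel → start ≤ i₀ →
      init3FindLoop s start = String.mk (s.drop i₀) := by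
  have hlen₀ : i₀ + 3 ≤ s.length := augAt_lt_length hA
  intro fuel
  induction fuel with
  | zero => intro start hf hs; omega
  | succ fuel ih =>
    intro start hf hs
    rw [init3FindLoop]
    have hlen : start ≤ s.length := by omega
    have h : ¬ PySem.Chars.findFrom s ['A', 'U', 'G'] (start : Int) none = -1 := by
      rw [PySem.Chars.findFrom_natCast_eq_neg_one_iff s _ start hlen]
      intro hni
      apply hni
      rw [← PySem.Chars.isIn_iff_infix, ← PySem.Chars.exists_prefix_drop_iff_isIn]
      refine ⟨i₀ - start, ?_⟩
      rw [List.drop_drop]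
      convert hA.2 using 2
      omega
    have hspec := PySem.Chars.findFrom_natCast_spec s ['A', 'U', 'G'] start hlen h
    set idx := PySem.Chars.findFrom s ['A', 'U', 'G'] (start : Int) none with hidx
    have hge : (0 : Int) ≤ idx := le_trans (Int.natCast_nonneg _) hspec.1
    have hle : idx.toNat ≤ i₀ := by
      by_contra hgt
      exact hspec.2.2 i₀ hs (by omega) hA.2
    by_cases hm : PySem.Int.mod idx 3 = 2
    · have hmod : idx.toNat % 3 = 2 := by
        rw [PySem.Int.mod_eq_emod_of_pos (by norm_num : (0:Int) < 3)] at hm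
        omega
      have heq : idx.toNat = i₀ := by
        by_contra hne
        exact hmin idx.toNat (by omega) ⟨hmod, hspec.2.1⟩
      rw [dif_neg h, if_pos hm, PySem.List.slice_from s hge, heq]
    · have hne : idx.toNat ≠ i₀ := by
        intro he
        apply hm
        have hA1 : i₀ % 3 = 2 := hA.1
        rw [PySem.Int.mod_eq_emod_of_pos (by norm_num : (0:Int) < 3)]
        omega
      rw [dif_neg h, if_neg hm]
      exact ih (idx.toNat + 1) (by omega) (by omega)

-- A's index list is the arithmetic progression 2, 5, 8, … below len(arn)
theorem pyRange_A (n : Nat) :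
    PySem.List.pyRange 2 (n : Int) 3 =
      List.map (fun j : Nat => 2 + 3 * (j : Int))
        (List.range' 0 (if (2 : Int) < (n : Int) then (((n : Int) - 2 + 3 - 1) / 3).toNat else 0)) := by
  rw [PySem.List.pyRange_of_pos 2 (n : Int) (by norm_num), ← List.range_eq_range']

theorem init3_eq_alt (arn : String) : init3 arn = init3_alt arn := by
  classical
  set s := arn.toList with hs
  by_cases hex : ∃ i, AugAt s i
  · have hi := Nat.find_spec hex
    have hmin : ∀ j < Nat.find hex, ¬ AugAt s j := fun j hj => Nat.find_min hex hj
    set i₀ := Nat.find hex with hi0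
    have hlen : i₀ + 3 ≤ s.length := augAt_lt_length hi
    have hm2 : i₀ % 3 = 2 := hi.1
    rw [init3, PySem.Str.len_eq, ← hs, pyRange_A]
    rw [if_pos (by exact_mod_cast by omega : (2 : Int) < (s.length : Int))]
    have hcnt : (((s.length : Int) - 2 + 3 - 1) / 3).toNat = s.length / 3 := by
      have : ((s.length : Int) - 2 + 3 - 1) = (s.length : Int) := by ring
      rw [this]
      omega
    rw [hcnt, codons_some s i₀ hi hmin (s.length / 3) 0 (by omega) (by omega)]
    rw [init3_alt, ← hs, loopB_some s i₀ hi hmin (i₀ + 1) 0 (by omega) (by omega)]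
  · push_neg at hex
    rw [init3, PySem.Str.len_eq, ← hs, pyRange_A, codons_none s hex]
    rw [init3_alt, ← hs, loopB_none s hex (s.length + 1) 0 (by omega)]

-- ===== VERDICT (by name: the statement is the Claim_ definition above) =====
theorem init3_spec : Claim_equal_init3 := by
  intro arn _
  unfold Spec_init3
  exact init3_eq_alt arn
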